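-- pv_equiv track=rewrite | github.com/pmwasson/Randocity | lfsr.py | lfsr_forward
-- ===== SOURCE A (Python) =====
-- def simplify(list):
--     list.sort()
--     last = -1
--     copy = list.copy()
--     for i in copy:
--         if(i == last):
--             list.remove(i);
--             list.remove(i)
--             last = -1
--         else:
--             last = i
--
-- def lfsr_forward(lfsr,degree,poly):
--     # shift down
--     lsb = lfsr.pop(0)
--     lfsr.append([])
--
--     for i in range(degree):
--         if ((poly>>i)&1):
--             lfsr[i] += lsb
--             simplify(lfsr[i])
--     return lfsr
-- ===== SOURCE B (Python) =====
-- def lfsr_forward(lfsr, degree, poly):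
--     # shift down
--     lsb = lfsr.pop(0)
--     lfsr.append([])
--
--     for i, cell in enumerate(lfsr):
--         if i < degree and (poly >> i) & 1:
--             counts = {}
--             for v in cell + lsb:
--                 counts[v] = counts.get(v, 0) + 1
--             lfsr[i] = sorted(v for v, c in counts.items() if c % 2)
--     return lfsr
-- ===== Notes on version B (the rewrite author's own statement) =====
-- stated objective: alternative
-- what changed: simplify's sort-then-scan with pairwise list.remove cancellation is replaced by a dict of multiplicities per tapped cell (keeping the odd-count values, sorted once), and the index loop over range(degree) is replaced by a single enumerate pass over the cells.
-- outside the precondition, e.g. on lfsr_forward([[-2, -1]], 1, 1): A returns [[-2, -1]], B returns [[-2, -1]]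
import Mathlib
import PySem

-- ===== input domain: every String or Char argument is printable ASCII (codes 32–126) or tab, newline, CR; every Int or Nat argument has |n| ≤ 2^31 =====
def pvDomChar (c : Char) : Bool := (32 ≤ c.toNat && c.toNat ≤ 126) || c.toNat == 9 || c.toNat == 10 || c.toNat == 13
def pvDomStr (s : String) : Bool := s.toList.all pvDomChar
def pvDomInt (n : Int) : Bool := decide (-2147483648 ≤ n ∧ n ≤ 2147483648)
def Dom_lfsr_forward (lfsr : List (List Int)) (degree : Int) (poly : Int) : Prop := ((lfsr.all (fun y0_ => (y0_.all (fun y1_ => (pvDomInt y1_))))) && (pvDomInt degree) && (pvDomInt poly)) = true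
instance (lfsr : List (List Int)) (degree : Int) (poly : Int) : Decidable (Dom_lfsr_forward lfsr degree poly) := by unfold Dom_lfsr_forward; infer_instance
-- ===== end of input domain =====

-- B replaces simplify's sort-then-cancel-adjacent-pairs scan (with its list.remove calls)
-- by a dict of multiplicities per cell, keeping the odd-count values sorted, and replaces the
-- index loop over range(degree) by a single enumerate pass over the cells (objective: alternative).
-- Note: the Python A mutates lfsr in place (pop/append/in-place cell updates) and returns it;
-- B performs the same kind of in-place update; the equivalence proved here is about the return value.


-- ===== PORT A =====
-- simplify's for-loop over `copy` with state (list, last); ValueError of list.remove = none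
def simpLoopA : List Int → List Int → Int → Option (List Int)
  | [], lst, _ => some lst
  | i :: rest, lst, last =>
    if i = last then
      match PySem.List.remove? lst i with
      | none => none
      | some l1 =>
        match PySem.List.remove? l1 i with
        | none => none
        | some l2 => simpLoopA rest l2 (-1)
    else simpLoopA rest lst i

-- simplify(list): list.sort(); then the cancellation loop over copy = list.copy()
def simplifyA (l : List Int) : Option (List Int) :=
  let s := PySem.List.sorted l (fun x => x) false
  simpLoopA s s (-1)

-- body of `for i in range(degree)`; none = IndexError/ValueError propagating
def tapStepA (lsb : List Int) (poly : Int) (acc : Option (List (List Int))) (i : Int) : Option (List (List Int)) :=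
  match acc with
  | none => none
  | some l =>
    if PySem.Int.band (poly >>> i.toNat) 1 = 1 then   -- i ≥ 0 in range(degree), so i.toNat is exact
      match PySem.List.pyGet? l i with
      | none => none
      | some cell =>
        match simplifyA (cell ++ lsb) with            -- lfsr[i] += lsb; simplify(lfsr[i])
        | none => none
        | some newCell => some (PySem.List.pySetD l i newCell)
    else some l

def lfsr_forward (lfsr : List (List Int)) (degree : Int) (poly : Int) : List (List Int) :=
  match lfsr with
  | [] => []                                           -- lfsr.pop(0) raises IndexError (outside Pre_)
  | lsb :: rest =>
    (((PySem.List.pyRange 0 degree 1).foldl (tapStepA lsb poly) (some (rest ++ [[]]))).getD [])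

-- ===== PORT B =====
-- counts[v] = counts.get(v, 0) + 1
def countStepB (d : PySem.Dict Int Int) (v : Int) : PySem.Dict Int Int :=
  d.insert v (d.getD v 0 + 1)

-- sorted(v for v, c in counts.items() if c % 2), counts built by the loop over cell + lsb
def oddSortedB (xs : List Int) : List Int :=
  PySem.List.sorted
    (((xs.foldl countStepB PySem.Dict.empty).items.filter
        (fun p => decide (PySem.Int.mod p.2 2 ≠ 0))).map Prod.fst)
    (fun x => x) false

def lfsr_forward_alt (lfsr : List (List Int)) (degree : Int) (poly : Int) : List (List Int) :=
  match lfsr with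
  | [] => []                                           -- lfsr.pop(0) raises IndexError (outside Pre_)
  | lsb :: rest =>
    -- for i, cell in enumerate(lfsr): if i < degree and (poly >> i) & 1: lfsr[i] = …
    (PySem.List.enumerate (rest ++ [[]]) 0).map (fun p =>
      if p.1 < degree ∧ PySem.Int.band (poly >>> p.1.toNat) 1 = 1 then
        oddSortedB (p.2 ++ lsb)
      else p.2)

-- ===== PRECONDITION & SPEC =====
-- Pre_ excludes the inputs where A raises or may raise: empty lfsr (pop(0) IndexError), a set tap
-- bit at an index ≥ lfsr's length (IndexError), and the value -1 occurring in a tapped cell or in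
-- the popped head list — A's simplify uses -1 as its loop sentinel and raises ValueError on most
-- such inputs; on the remaining ones (where the -1 run is entered after an odd run of a smaller
-- value and has multiplicity ≤ 2) A returns the same parity result as B, and those inputs are
-- excluded together with the raising ones (see the cite in claim.json).
-- (The ∀ is cut off at max(length, 32)+1 only to keep the instance cheap to evaluate: inside
-- Dom_ |poly| ≤ 2^31, so bits of poly at indices ≥ 32 are all 0 (poly ≥ 0) or all 1 (poly < 0),
-- and a violation at some i < degree is always already visible below that bound.)
def Pre_lfsr_forward (lfsr : List (List Int)) (degree : Int) (poly : Int) : Prop :=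
  lfsr ≠ [] ∧
  ∀ i : Nat, i < min degree.toNat (max lfsr.length 32 + 1) →
    PySem.Int.band (poly >>> i) 1 = 1 →
    i < lfsr.length ∧ (-1 : Int) ∉ lfsr.headD [] ∧ (-1 : Int) ∉ lfsr.getD (i + 1) []

instance (lfsr : List (List Int)) (degree : Int) (poly : Int) : Decidable (Pre_lfsr_forward lfsr degree poly) := by
  unfold Pre_lfsr_forward; infer_instance

def pvWitness_lfsr_forward : List (List Int) × Int × Int := ([[1, 2], [2, 3]], 2, 3)

def Spec_lfsr_forward (lfsr : List (List Int)) (degree : Int) (poly : Int) (out : List (List Int)) : Prop := out = lfsr_forward_alt lfsr degree poly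
instance (lfsr : List (List Int)) (degree : Int) (poly : Int) (out : List (List Int)) : Decidable (Spec_lfsr_forward lfsr degree poly out) := by unfold Spec_lfsr_forward; infer_instance

-- ===== CLAIM (what is proved, stated in full; the proofs are below) =====
def Claim_equal_lfsr_forward : Prop := ∀ (lfsr : List (List Int)) (degree : Int) (poly : Int), Dom_lfsr_forward lfsr degree poly → Pre_lfsr_forward lfsr degree poly → Spec_lfsr_forward lfsr degree poly (lfsr_forward lfsr degree poly)

-- ===== LEMMAS AND PROOFS =====

-- the canonical result of A's cancellation pass on a sorted list: adjacent equal pairs vanish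
def dedupOdd : List Int → List Int
  | [] => []
  | [x] => [x]
  | x :: y :: t => if x = y then dedupOdd t else x :: dedupOdd (y :: t)

lemma remove_skip_prefix (acc : List Int) (t : List Int) (x : Int) (h : x ∉ acc) :
    PySem.List.remove? (acc ++ x :: t) x = some (acc ++ t) := by
  induction acc with
  | nil => simp [PySem.List.remove?_cons_self]
  | cons a acc ih =>
    have hax : a ≠ x := by intro e; exact h (by simp [e])
    have hrec := ih (by intro hx; exact h (by simp [hx]))
    rw [List.cons_append, PySem.List.remove?_cons_of_ne _ hax, hrec]
    rfl

lemma mem_dedupOdd {x : Int} : ∀ {s : List Int}, x ∈ dedupOdd s → x ∈ s := by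
  intro s
  induction s using dedupOdd.induct with
  | case1 => simp [dedupOdd]
  | case2 y => simp [dedupOdd]
  | case3 y t ih => intro hm; rw [dedupOdd, if_pos rfl] at hm; simp [ih hm]
  | case4 y z t hyz ih =>
    intro hm; rw [dedupOdd, if_neg hyz, List.mem_cons] at hm
    rcases hm with hm | hm
    · simp [hm]
    · have := ih hm; simp at this ⊢; tauto

lemma count_dedupOdd (z : Int) : ∀ (s : List Int), s.Pairwise (· ≤ ·) →
    (dedupOdd s).count z = s.count z % 2 := by
  intro s
  induction s using dedupOdd.induct with
  | case1 => intro _; simp [dedupOdd]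
  | case2 y =>
    intro _
    rw [dedupOdd]
    rcases eq_or_ne y z with h | h <;> simp [h]
  | case3 y t ih =>
    intro hp
    have ht : t.Pairwise (· ≤ ·) := (hp.tail).tail
    rw [dedupOdd, if_pos rfl, ih ht]
    rcases eq_or_ne y z with h | h <;> simp [List.count_cons] <;> omega
  | case4 y z' t hyz ih =>
    intro hp
    have hyz' : y < z' := lt_of_le_of_ne (List.rel_of_pairwise_cons hp (by simp)) hyz
    have hynott : y ∉ z' :: t := by
      intro hmem
      have : y < y := lt_of_lt_of_le hyz'
        (by
          rcases List.mem_cons.mp hmem with h | h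
          · exact le_of_eq h.symm
          · exact List.rel_of_pairwise_cons hp.tail h)
      exact absurd this (lt_irrefl y)
    have ih' := ih hp.tail
    rw [dedupOdd, if_neg hyz]
    rcases eq_or_ne y z with h | h
    · subst h
      have hc0 : (z' :: t).count y = 0 := by
        rw [List.count_eq_zero]; exact hynott
      have hc0' : (dedupOdd (z' :: t)).count y = 0 := by rw [ih', hc0]
      simp [hc0, hc0']
    · simp [List.count_cons, h, ih']

lemma pairwise_lt_dedupOdd : ∀ (s : List Int), s.Pairwise (· ≤ ·) →
    (dedupOdd s).Pairwise (· < ·) := by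
  intro s
  induction s using dedupOdd.induct with
  | case1 => intro _; simp [dedupOdd]
  | case2 y => intro _; simp [dedupOdd]
  | case3 y t ih =>
    intro hp; rw [dedupOdd, if_pos rfl]; exact ih (hp.tail).tail
  | case4 y z t hyz ih =>
    intro hp
    have hyz' : y < z := lt_of_le_of_ne (List.rel_of_pairwise_cons hp (by simp)) hyz
    rw [dedupOdd, if_neg hyz]
    refine List.pairwise_cons.mpr ⟨?_, ih hp.tail⟩
    intro b hb
    have hbmem : b ∈ z :: t := mem_dedupOdd hb
    rcases List.mem_cons.mp hbmem with h | h
    · exact h ▸ hyz'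
    · exact lt_of_lt_of_le hyz' (List.rel_of_pairwise_cons hp.tail h)

lemma simpLoopA_eq : ∀ (n : Nat) (s acc : List Int) (last : Int), s.length ≤ n →
    s.Pairwise (· ≤ ·) → (-1 : Int) ∉ s → (∀ a ∈ acc, ∀ b ∈ s, a < b) → last ∉ s →
    simpLoopA s (acc ++ s) last = some (acc ++ dedupOdd s) := by
  intro n
  induction n with
  | zero =>
    intro s acc last hlen _ _ _ _
    have : s = [] := List.eq_nil_of_length_eq_zero (Nat.le_zero.mp hlen)
    subst this; simp [simpLoopA, dedupOdd]
  | succ m ih =>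
    intro s acc last hlen hp hneg hacc hlast
    match s with
    | [] => simp [simpLoopA, dedupOdd]
    | [x] =>
      have hxl : x ≠ last := by intro e; exact hlast (by simp [e])
      simp only [simpLoopA, if_neg hxl]
      simp [dedupOdd]
    | x :: y :: t =>
      have hxl : x ≠ last := by intro e; exact hlast (by simp [e])
      rw [show simpLoopA (x :: y :: t) (acc ++ x :: y :: t) last
            = simpLoopA (y :: t) (acc ++ x :: y :: t) x by
          simp [simpLoopA, if_neg hxl]]
      by_cases hxy : x = y
      · -- cancelling pair
        subst hxy
        have hxacc : x ∉ acc := by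
          intro hmem
          exact absurd (hacc x hmem x (by simp)) (lt_irrefl x)
        have h1 : PySem.List.remove? (acc ++ x :: x :: t) x = some (acc ++ x :: t) :=
          remove_skip_prefix acc (x :: t) x hxacc
        have h2 : PySem.List.remove? (acc ++ x :: t) x = some (acc ++ t) :=
          remove_skip_prefix acc t x hxacc
        rw [show simpLoopA (x :: t) (acc ++ x :: x :: t) x
              = simpLoopA t (acc ++ t) (-1) by
            simp [simpLoopA, h1, h2]]
        have hneg' : (-1 : Int) ∉ t := fun h => hneg (by simp [h])
        have step := ih t acc (-1) (by simp at hlen; omega)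
          ((hp.tail).tail) hneg'
          (fun a ha b hb => hacc a ha b (by simp [hb])) hneg'
        rw [step]
        simp [dedupOdd]
      · -- kept element
        have hxy' : x < y := lt_of_le_of_ne (List.rel_of_pairwise_cons hp (by simp)) hxy
        have haccx : ∀ a ∈ acc ++ [x], ∀ b ∈ y :: t, a < b := by
          intro a ha b hb
          rcases List.mem_append.mp ha with h | h
          · exact hacc a h b (by simp [hb])
          · have : a = x := by simpa using h
            subst this
            rcases List.mem_cons.mp hb with h' | h'
            · exact h' ▸ hxy'
            · exact lt_of_lt_of_le hxy' (List.rel_of_pairwise_cons hp.tail h')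
        have hxnot : x ∉ y :: t := by
          intro hmem
          exact absurd (haccx x (by simp) x hmem) (lt_irrefl x)
        have step := ih (y :: t) (acc ++ [x]) x (by simp at hlen ⊢; omega)
          hp.tail (fun h => hneg (by simp [h])) haccx hxnot
        rw [show acc ++ x :: y :: t = (acc ++ [x]) ++ y :: t by simp]
        rw [step]
        rw [dedupOdd, if_neg hxy]
        simp

lemma simplifyA_eq (l : List Int) (h : (-1 : Int) ∉ l) :
    simplifyA l = some (dedupOdd (PySem.List.sorted l (fun x => x) false)) := by
  have hmem : (-1 : Int) ∉ PySem.List.sorted l (fun x => x) false := by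
    rw [PySem.List.mem_sorted]; exact h
  have := simpLoopA_eq (PySem.List.sorted l (fun x => x) false).length
    (PySem.List.sorted l (fun x => x) false) [] (-1) le_rfl
    (PySem.List.sorted_pairwise l (fun x => x)) hmem (by simp) hmem
  simpa [simplifyA] using this

-- B's odd-count key list, characterised
lemma oddKeys_eq (xs : List Int) :
    ((xs.foldl countStepB PySem.Dict.empty).items.filter
        (fun p => decide (PySem.Int.mod p.2 2 ≠ 0))).map Prod.fst
    = (PySem.Set.ofList xs).filter (fun k => decide (PySem.Int.mod (xs.count k : Int) 2 ≠ 0)) := by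
  have hc : xs.foldl countStepB PySem.Dict.empty = PySem.Dict.counter xs :=
    PySem.Dict.foldl_insert_getD_add_one_eq_counter xs
  rw [hc, PySem.Dict.items_counter, List.filter_map, List.map_map]
  simp [Function.comp_def]

lemma mod_two_ne_zero (c : Nat) : (PySem.Int.mod (c : Int) 2 ≠ 0) ↔ c % 2 = 1 := by
  simp [PySem.Int.mod, Int.fmod_eq_emod]
  omega

lemma oddSortedB_eq (xs : List Int) (h : (-1 : Int) ∉ xs) :
    simplifyA xs = some (oddSortedB xs) := by
  rw [simplifyA_eq xs h]
  unfold oddSortedB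
  congr 1
  rw [oddKeys_eq]
  have hnodupT : ((PySem.Set.ofList xs).filter
      (fun k => decide (PySem.Int.mod (xs.count k : Int) 2 ≠ 0)) : List Int).Nodup :=
    (PySem.Set.nodup_ofList xs).filter _
  have hpwD : (dedupOdd (PySem.List.sorted xs (fun x => x) false)).Pairwise (· < ·) :=
    pairwise_lt_dedupOdd _ (PySem.List.sorted_pairwise xs (fun x => x))
  have hnodupD : (dedupOdd (PySem.List.sorted xs (fun x => x) false)).Nodup :=
    hpwD.imp (fun h => ne_of_lt h)
  have hmemD : ∀ a : Int, a ∈ dedupOdd (PySem.List.sorted xs (fun x => x) false)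
      ↔ xs.count a % 2 = 1 := by
    intro a
    have hc := count_dedupOdd a (PySem.List.sorted xs (fun x => x) false)
      (PySem.List.sorted_pairwise xs (fun x => x))
    have hcs : (PySem.List.sorted xs (fun x => x) false).count a = xs.count a :=
      (PySem.List.sorted_perm xs (fun x => x) false).count_eq a
    constructor
    · intro hmem
      have : (dedupOdd (PySem.List.sorted xs (fun x => x) false)).count a ≠ 0 := by
        simpa [Nat.pos_iff_ne_zero] using (List.count_pos_iff.mpr hmem)
      rw [hc, hcs] at this
      omega
    · intro hodd
      have : (dedupOdd (PySem.List.sorted xs (fun x => x) false)).count a ≠ 0 := by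
        rw [hc, hcs]; omega
      exact List.count_pos_iff.mp (Nat.pos_of_ne_zero this)
  have hmemT : ∀ a : Int, a ∈ (PySem.Set.ofList xs).filter
      (fun k => decide (PySem.Int.mod (xs.count k : Int) 2 ≠ 0)) ↔ xs.count a % 2 = 1 := by
    intro a
    rw [List.mem_filter]
    constructor
    · intro ⟨_, hodd⟩
      exact (mod_two_ne_zero (xs.count a)).mp (by simpa using hodd)
    · intro hodd
      refine ⟨(PySem.Set.mem_ofList xs a).mpr ?_, by simpa using (mod_two_ne_zero (xs.count a)).mpr hodd⟩
      have : xs.count a ≠ 0 := by omega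
      exact List.count_pos_iff.mp (Nat.pos_of_ne_zero this)
  have hperm : (dedupOdd (PySem.List.sorted xs (fun x => x) false)).Perm
      ((PySem.Set.ofList xs).filter
        (fun k => decide (PySem.Int.mod (xs.count k : Int) 2 ≠ 0))) :=
    (List.perm_ext_iff_of_nodup hnodupD hnodupT).mpr
      (fun a => by rw [hmemD a, hmemT a])
  exact (PySem.List.sorted_eq_of_perm_of_pairwise_lt _ _ _ hperm hpwD).symm

-- Int >>> Int and Int >>> Nat agree on a natural shift amount
lemma shift_int_nat (poly : Int) (j : Nat) : poly >>> (j : Int) = poly >>> j := by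
  cases poly with
  | ofNat m =>
    show (m : Int) >>> (j : Int) = _
    rw [Int.shiftRight_natCast]; rfl
  | negSucc m => rw [Int.shiftRight_negSucc]; rfl

-- bits of poly at index ≥ 32 are determined by poly's sign when |poly| ≤ 2^31
lemma band_shift_high (poly : Int) (j : Nat) (h32 : 32 ≤ j)
    (hlo : -2147483648 ≤ poly) (hhi : poly ≤ 2147483648) :
    PySem.Int.band (poly >>> j) 1 = if poly < 0 then 1 else 0 := by
  have h2 : (2147483648 : Nat) < 2 ^ j := by
    calc (2147483648 : Nat) < 2 ^ 32 := by norm_num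
    _ ≤ 2 ^ j := Nat.pow_le_pow_right (by norm_num) h32
  cases poly with
  | ofNat m =>
    have hm : m ≤ 2147483648 := by
      have h : (Int.ofNat m) = (m : Int) := rfl
      omega
    have : m >>> j = 0 := by
      rw [Nat.shiftRight_eq_div_pow]
      exact Nat.div_eq_of_lt (by omega)
    have he : (Int.ofNat m) >>> j = Int.ofNat (m >>> j) := rfl
    rw [he, this]
    simp [PySem.Int.band]
  | negSucc m =>
    have hm : m < 2147483648 := by
      have : (Int.negSucc m) = -(m + 1 : Int) := rfl
      omega
    have : m >>> j = 0 := by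
      rw [Nat.shiftRight_eq_div_pow]
      exact Nat.div_eq_of_lt (by omega)
    have he : (Int.negSucc m) >>> j = Int.negSucc (m >>> j) := rfl
    rw [he, this]
    have : Int.negSucc 0 = -1 := rfl
    rw [this, if_pos (by exact Int.negSucc_lt_zero m)]
    decide

-- under Dom_ and Pre_, every tapped bit below degree indexes into the list
lemma tapped_lt (L : Nat) (degree poly : Int)
    (hlo : -2147483648 ≤ poly) (hhi : poly ≤ 2147483648)
    (hpre : ∀ i : Nat, i < min degree.toNat (max L 32 + 1) →
      PySem.Int.band (poly >>> i) 1 = 1 → i < L) :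
    ∀ i : Nat, i < degree.toNat → PySem.Int.band (poly >>> i) 1 = 1 → i < L := by
  intro i hi hb
  by_cases hiM : i < max L 32 + 1
  · exact hpre i (by omega) hb
  · exfalso
    by_cases hneg : poly < 0
    · -- the bit at index max L 32 is also set and lies inside Pre_'s window
      have hj : PySem.Int.band (poly >>> (max L 32)) 1 = 1 := by
        rw [band_shift_high poly (max L 32) (le_max_right L 32) hlo hhi, if_pos hneg]
      have := hpre (max L 32) (by omega) hj
      omega
    · have := band_shift_high poly i (by omega) hlo hhi
      rw [if_neg hneg] at this
      rw [hb] at this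
      exact one_ne_zero this

lemma getD_append_empty (rest : List (List Int)) : ∀ (j : Nat),
    (rest ++ [[]]).getD j [] = rest.getD j [] := by
  induction rest with
  | nil => intro j; cases j <;> simp [List.getD]
  | cons r rest ih => intro j; cases j with
    | zero => rfl
    | succ j => simpa using ih j

-- pointwise characterisation of A's fold over the tap indices
lemma foldA_char (lsb : List Int) (poly degree : Int) (orig : List (List Int))
    (htap : ∀ i : Nat, i < degree.toNat → PySem.Int.band (poly >>> i) 1 = 1 →
      i < orig.length ∧ (-1 : Int) ∉ lsb ∧ (-1 : Int) ∉ orig.getD i []) :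
    ∀ (k : Nat) (a : Int) (l : List (List Int)), 0 ≤ a → (degree - a).toNat = k →
    l.length = orig.length →
    (∀ j : Nat, a ≤ (j : Int) → l.getD j [] = orig.getD j []) →
    ∃ r, (PySem.List.pyRange a degree 1).foldl (tapStepA lsb poly) (some l) = some r ∧
      r.length = orig.length ∧
      ∀ j : Nat, r.getD j [] =
        if a ≤ (j : Int) ∧ (j : Int) < degree ∧ PySem.Int.band (poly >>> j) 1 = 1
        then oddSortedB (orig.getD j [] ++ lsb) else l.getD j [] := by
  intro k
  induction k with
  | zero =>
    intro a l ha hk hlen hinv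
    rw [PySem.List.pyRange_one_eq_nil (by omega)]
    refine ⟨l, rfl, hlen, fun j => ?_⟩
    rw [if_neg (by omega)]
  | succ m ih =>
    intro a l ha hk hlen hinv
    have hlt : a < degree := by omega
    rw [PySem.List.pyRange_one_cons hlt, List.foldl_cons]
    by_cases hb : PySem.Int.band (poly >>> a.toNat) 1 = 1
    · have hta := htap a.toNat (by omega) hb
      have halen : a.toNat < l.length := by omega
      have hget' : l[a.toNat]? = some (l.getD a.toNat []) := by
        rw [List.getD_eq_getElem?_getD, List.getElem?_eq_getElem halen]
        rfl
      have hget : PySem.List.pyGet? l a = some (l.getD a.toNat []) := by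
        rw [PySem.List.pyGet?_of_nonneg l ha]; exact hget'
      have hcell : l.getD a.toNat [] = orig.getD a.toNat [] := hinv a.toNat (by omega)
      have hne : (-1 : Int) ∉ l.getD a.toNat [] ++ lsb := by
        rw [List.mem_append]
        rintro (h | h)
        · exact (hcell ▸ hta.2.2) h
        · exact hta.2.1 h
      have hsimp := oddSortedB_eq (l.getD a.toNat [] ++ lsb) hne
      simp only [tapStepA, if_pos hb, hget, hsimp]
      rw [PySem.List.pySetD_of_nonneg (h := ha)]
      set x := oddSortedB (l.getD a.toNat [] ++ lsb) with hx
      obtain ⟨r, hr, hrlen, hchar⟩ := ih (a + 1) (l.set a.toNat x) (by omega) (by omega)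
        (by rw [List.length_set]; exact hlen)
        (by
          intro j hj
          have hjne : a.toNat ≠ j := by omega
          rw [List.getD_eq_getElem?_getD, List.getElem?_set_ne hjne,
            ← List.getD_eq_getElem?_getD]
          exact hinv j (by omega))
      refine ⟨r, hr, hrlen, fun j => ?_⟩
      by_cases hja : (j : Int) = a
      · have hj : j = a.toNat := by omega
        rw [if_pos ⟨by omega, by omega, by rw [hj] at *; exact hb⟩]
        rw [hchar j, if_neg (by omega)]
        rw [List.getD_eq_getElem?_getD, hj, List.getElem?_set_self (by omega)]
        rw [Option.getD_some, hx, hcell]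
      · rw [hchar j]
        have hset : (l.set a.toNat x).getD j [] = l.getD j [] := by
          have hjne : a.toNat ≠ j := by omega
          rw [List.getD_eq_getElem?_getD, List.getElem?_set_ne hjne,
            ← List.getD_eq_getElem?_getD]
        by_cases hc : a ≤ (j : Int) ∧ (j : Int) < degree ∧ PySem.Int.band (poly >>> j) 1 = 1
        · rw [if_pos ⟨by omega, hc.2.1, hc.2.2⟩, if_pos hc]
        · rw [if_neg (by
            intro ⟨h1, h2, h3⟩
            exact hc ⟨by omega, h2, h3⟩), if_neg hc, hset]
    · simp only [tapStepA, if_neg hb]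
      obtain ⟨r, hr, hrlen, hchar⟩ := ih (a + 1) l (by omega) (by omega) hlen
        (fun j hj => hinv j (by omega))
      refine ⟨r, hr, hrlen, fun j => ?_⟩
      rw [hchar j]
      by_cases hja : (j : Int) = a
      · have hj : j = a.toNat := by omega
        rw [if_neg (by omega), if_neg (by
          intro ⟨h1, h2, h3⟩
          rw [hj] at h3; exact hb h3)]
      · by_cases hc : a ≤ (j : Int) ∧ (j : Int) < degree ∧ PySem.Int.band (poly >>> j) 1 = 1
        · rw [if_pos ⟨by omega, hc.2.1, hc.2.2⟩, if_pos hc]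
        · rw [if_neg (by
            intro ⟨h1, h2, h3⟩
            exact hc ⟨by omega, h2, h3⟩), if_neg hc]

-- ===== VERDICT (by name: the statement is the Claim_ definition above) =====
theorem lfsr_forward_spec : Claim_equal_lfsr_forward := by
  intro lfsr degree poly hdom hpre
  obtain ⟨hne, hp⟩ := hpre
  have hdom' : -2147483648 ≤ poly ∧ poly ≤ 2147483648 := by
    unfold Dom_lfsr_forward at hdom
    simp [pvDomInt] at hdom
    exact hdom.2
  cases lfsr with
  | nil => exact absurd rfl hne
  | cons lsb rest =>
    have hL : (lsb :: rest).length = rest.length + 1 := by simp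
    have htapL : ∀ i : Nat, i < degree.toNat → PySem.Int.band (poly >>> i) 1 = 1 →
        i < rest.length + 1 := by
      have := tapped_lt (rest.length + 1) degree poly hdom'.1 hdom'.2
        (fun i hi hb => by
          have := hp i (by simpa [hL] using hi) hb
          simpa [hL] using this.1)
      simpa [hL] using this
    set orig := rest ++ [[]] with horig
    have horigL : orig.length = rest.length + 1 := by simp [horig]
    have htap : ∀ i : Nat, i < degree.toNat → PySem.Int.band (poly >>> i) 1 = 1 →
        i < orig.length ∧ (-1 : Int) ∉ lsb ∧ (-1 : Int) ∉ orig.getD i [] := by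
      intro i hi hb
      have hiL := htapL i hi hb
      have hpi := hp i (by simp [hL]; omega) hb
      refine ⟨by omega, by simpa using hpi.2.1, ?_⟩
      rw [horig, getD_append_empty rest i]
      simpa using hpi.2.2
    obtain ⟨r, hr, hrlen, hchar⟩ := foldA_char lsb poly degree orig htap
      degree.toNat 0 orig (le_refl 0) (by omega) rfl (fun j _ => rfl)
    show lfsr_forward (lsb :: rest) degree poly = lfsr_forward_alt (lsb :: rest) degree poly
    have hA : lfsr_forward (lsb :: rest) degree poly
        = ((PySem.List.pyRange 0 degree 1).foldl (tapStepA lsb poly) (some orig)).getD [] := rfl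
    have hB : lfsr_forward_alt (lsb :: rest) degree poly
        = (PySem.List.enumerate orig 0).map (fun p =>
            if p.1 < degree ∧ PySem.Int.band (poly >>> p.1.toNat) 1 = 1 then
              oddSortedB (p.2 ++ lsb)
            else p.2) := rfl
    rw [hA, hB, hr]
    show r = (PySem.List.enumerate orig 0).map _
    apply List.ext_getElem
    · rw [hrlen, List.length_map, PySem.List.length_enumerate, horigL]
    · intro j hj1 hj2
      have hjo : j < orig.length := by
        rw [hrlen] at hj1; exact hj1
      rw [List.getElem_map, PySem.List.getElem_enumerate]
      have hrj : r[j] = r.getD j [] := by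
        rw [List.getD_eq_getElem?_getD, List.getElem?_eq_getElem hj1]; rfl
      rw [hrj, hchar j]
      have horigj : orig.getD j [] = orig[j] := by
        rw [List.getD_eq_getElem?_getD, List.getElem?_eq_getElem hjo]; rfl
      have hcast : PySem.Int.band (poly >>> (j : Int)) 1 = 1 ↔ PySem.Int.band (poly >>> j) 1 = 1 := by rw [shift_int_nat]
      by_cases hc : (j : Int) < degree ∧ PySem.Int.band (poly >>> (j : Int)) 1 = 1
      · rw [if_pos ⟨by omega, hc.1, hcast.mp hc.2⟩, horigj]
        rw [if_pos (by
          refine ⟨by simpa using hc.1, ?_⟩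
          have : ((0 : Int) + (j : Int)).toNat = j := by omega
          rw [this]; exact hc.2)]
      · rw [if_neg (by
          intro ⟨h1, h2, h3⟩
          exact hc ⟨h2, hcast.mpr h3⟩), horigj]
        rw [if_neg (by
          intro ⟨h1, h2⟩
          have : ((0 : Int) + (j : Int)).toNat = j := by omega
          rw [this] at h2
          exact hc ⟨by simpa using h1, h2⟩)]
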